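-- pv_equiv track=rewrite | github.com/taedonreth/slavery | anduril/team_photos.py | canTakePhoto
-- ===== SOURCE A (Python) =====
-- from typing import List
--
-- def canTakePhoto(heights1: List[int], heights2: List[int]) -> bool:
--     """
--     Determine if two teams can be arranged for a photo with height constraints.
--
--     Key Insight:
--     - If we can arrange them, the optimal strategy is to sort both teams
--     - Match shortest with shortest, 2nd shortest with 2nd shortest, etc.
--     - This greedy approach gives the best chance of satisfaction
--
--     Strategy:
--     1. Sort both arrays
--     2. Determine which team should be in front:
--        - If different sizes: smaller team must be in front
--        - If same size: try both configurations
--     3. Check if all front players < corresponding back players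
--
--     Why sorting works:
--     - If sorted[i] >= sorted[j] for any pairing, no rearrangement will help
--     - Sorting gives the best "cushion" for each comparison
--
--     Time: O(n log n + m log m) for sorting
--     Space: O(n + m) for sorted arrays
--     """
--     # Sort both teams
--     h1_sorted = sorted(heights1)
--     h2_sorted = sorted(heights2)
--
--     def can_arrange(front: List[int], back: List[int]) -> bool:
--         """Check if front team can all be strictly shorter than back team.
--
--         Uses two-pointer approach to optimally match front players with back players.
--         Since back may have more players, we can skip some back players.
--
--         Precondition: len(front) <= len(back) (guaranteed by caller)
--         """
--         i = 0  # Pointer for front team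
--         j = 0  # Pointer for back team
--
--         # Try to match each person in front with someone in back
--         while i < len(front) and j < len(back):
--             if front[i] < back[j]:
--                 # Found a valid match for front[i]
--                 i += 1
--                 j += 1
--             else:
--                 # front[i] >= back[j], try next person in back
--                 j += 1
--
--         # Check if we matched all front players
--         return i == len(front)
--
--     # Apply the size rule
--     if len(h1_sorted) < len(h2_sorted):
--         # Team 1 must be in front
--         return can_arrange(h1_sorted, h2_sorted)
--     elif len(h2_sorted) < len(h1_sorted):
--         # Team 2 must be in front
--         return can_arrange(h2_sorted, h1_sorted)
--     else:
--         # Equal size: either team can be in front, try both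
--         return can_arrange(h1_sorted, h2_sorted) or can_arrange(h2_sorted, h1_sorted)
-- ===== SOURCE B (Python) =====
-- from typing import List
--
-- def canTakePhoto(heights1: List[int], heights2: List[int]) -> bool:
--     """Sort both teams; the smaller team stands in front, aligned against the
--     tallest |front| members of the back row: front[i] must be < back[n-m+i].
--     (Only ever called with len(front) <= len(back), so the slice start is >= 0.)"""
--     a = sorted(heights1)
--     b = sorted(heights2)
--
--     def aligned(front: List[int], back: List[int]) -> bool:
--         # compare front elementwise with the top len(front) elements of back
--         return all(f < g for f, g in zip(front, back[len(back) - len(front):]))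
--
--     if len(a) < len(b):
--         return aligned(a, b)
--     elif len(b) < len(a):
--         return aligned(b, a)
--     else:
--         return aligned(a, b) or aligned(b, a)
-- ===== Notes on version B (the rewrite author's own statement) =====
-- stated objective: simpler
-- what changed: The two-pointer greedy matcher with skip logic is replaced by a direct aligned check: each front player is compared to the tallest len(front) members of the sorted back row via zip with a tail slice, eliminating the maintained pointers (and the interpreted while-loop).
import Mathlib
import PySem

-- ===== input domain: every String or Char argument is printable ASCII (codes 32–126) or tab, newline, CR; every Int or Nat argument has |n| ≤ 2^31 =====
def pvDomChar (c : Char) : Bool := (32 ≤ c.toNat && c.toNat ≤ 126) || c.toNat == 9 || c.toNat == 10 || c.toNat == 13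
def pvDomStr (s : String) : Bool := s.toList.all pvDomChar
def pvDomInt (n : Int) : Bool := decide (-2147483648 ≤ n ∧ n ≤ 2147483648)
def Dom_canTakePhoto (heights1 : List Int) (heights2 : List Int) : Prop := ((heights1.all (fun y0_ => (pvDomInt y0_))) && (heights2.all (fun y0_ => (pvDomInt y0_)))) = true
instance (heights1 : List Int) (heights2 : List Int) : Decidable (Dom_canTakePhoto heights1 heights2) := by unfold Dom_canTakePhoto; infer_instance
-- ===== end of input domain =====

-- B replaces A's two-pointer greedy matcher by a direct aligned comparison against the
-- top len(front) elements of the sorted back row (simpler; same asymptotic cost).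

-- ===== PORT A =====
-- can_arrange's while loop over pointers (i, j), transcribed as structural
-- recursion on the two suffixes front[i:], back[j:]
def canArrange : List Int → List Int → Bool
  | [], _ => true                 -- loop ended with i == len(front)
  | _ :: _, [] => false           -- back exhausted, i < len(front)
  | f :: fs, b :: bs => if f < b then canArrange fs bs else canArrange (f :: fs) bs

def canTakePhoto (heights1 : List Int) (heights2 : List Int) : Bool :=
  let h1s := PySem.List.sorted heights1 (fun x => x) false
  let h2s := PySem.List.sorted heights2 (fun x => x) false
  if h1s.length < h2s.length then canArrange h1s h2s
  else if h2s.length < h1s.length then canArrange h2s h1s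
  else canArrange h1s h2s || canArrange h2s h1s

-- ===== PORT B =====
-- all(f < g for f, g in zip(front, back[len(back)-len(front):])); the slice start is
-- nonnegative at every call site (len(front) ≤ len(back)), so back[k:] is List.drop k.
def aligned (front back : List Int) : Bool :=
  (front.zip (back.drop (back.length - front.length))).all (fun p => p.1 < p.2)

def canTakePhoto_alt (heights1 : List Int) (heights2 : List Int) : Bool :=
  let a := PySem.List.sorted heights1 (fun x => x) false
  let b := PySem.List.sorted heights2 (fun x => x) false
  if a.length < b.length then aligned a b
  else if b.length < a.length then aligned b a
  else aligned a b || aligned b a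

-- ===== PRECONDITION & SPEC =====
def Spec_canTakePhoto (heights1 : List Int) (heights2 : List Int) (out : Bool) : Prop := out = canTakePhoto_alt heights1 heights2
instance (heights1 : List Int) (heights2 : List Int) (out : Bool) : Decidable (Spec_canTakePhoto heights1 heights2 out) := by unfold Spec_canTakePhoto; infer_instance

-- ===== CLAIM (what is proved, stated in full; the proofs are below) =====
def Claim_equal_canTakePhoto : Prop := ∀ (heights1 : List Int) (heights2 : List Int), Dom_canTakePhoto heights1 heights2 → Spec_canTakePhoto heights1 heights2 (canTakePhoto heights1 heights2)

-- ===== LEMMAS AND PROOFS =====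

-- a longer front can never be fully matched
theorem canArrange_false_of_lt (back front : List Int)
    (h : back.length < front.length) : canArrange front back = false := by
  induction back generalizing front with
  | nil =>
    cases front with
    | nil => simp at h
    | cons f fs => rfl
  | cons b bs ih =>
    cases front with
    | nil => simp at h
    | cons f fs =>
      simp only [canArrange]
      split
      · exact ih fs (by simpa using Nat.lt_of_succ_lt_succ h)
      · exact ih (f :: fs) (Nat.lt_of_succ_lt h)

-- greedy two-pointer matching on sorted lists equals the aligned top-m comparison
theorem canArrange_eq_aligned (back front : List Int)
    (hf : front.Pairwise (· ≤ ·)) (hb : back.Pairwise (· ≤ ·))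
    (hlen : front.length ≤ back.length) :
    canArrange front back = aligned front back := by
  induction back generalizing front with
  | nil =>
    have : front = [] := List.eq_nil_of_length_eq_zero (Nat.le_zero.mp hlen)
    subst this; rfl
  | cons b bs ih =>
    cases front with
    | nil => simp [canArrange, aligned]
    | cons f fs =>
      have hf' : fs.Pairwise (· ≤ ·) := hf.of_cons
      have hb' : bs.Pairwise (· ≤ ·) := hb.of_cons
      have hble : ∀ c ∈ bs, b ≤ c := fun c hc => (List.pairwise_cons.mp hb).1 c hc
      simp only [canArrange]
      by_cases hfb : f < b
      · simp only [hfb, if_true]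
        rcases Nat.lt_or_ge fs.length bs.length with hlt | hge
        · -- strictly smaller front: the head b of back is skipped by the alignment
          have hk : bs.length - (f :: fs).length < bs.length := by
            simp only [List.length_cons]; omega
          have hdrop1 : (b :: bs).length - (f :: fs).length
              = (bs.length - (f :: fs).length) + 1 := by
            simp only [List.length_cons]; omega
          have hdrop2 : bs.length - fs.length = (bs.length - (f :: fs).length) + 1 := by
            simp only [List.length_cons]; omega
          have hsplit := List.drop_eq_getElem_cons (l := bs) hk
          have hflt : f < bs[bs.length - (f :: fs).length] :=
            lt_of_lt_of_le hfb (hble _ (List.getElem_mem hk))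
          rw [ih fs hf' hb' (Nat.le_of_lt hlt)]
          simp only [aligned]
          rw [hdrop1, hdrop2, List.drop_succ_cons, hsplit, List.zip_cons_cons, List.all_cons]
          simp only [List.length_cons] at hflt
          simp [hflt]
        · -- equal lengths: alignment is elementwise
          have heq : fs.length = bs.length := by
            have := hlen; simp only [List.length_cons] at this; omega
          have h0 : (b :: bs).length - (f :: fs).length = 0 := by
            simp only [List.length_cons]; omega
          have h0' : bs.length - fs.length = 0 := by omega
          rw [ih fs hf' hb' (Nat.le_of_eq heq)]
          simp only [aligned, h0, h0', List.drop_zero, List.zip_cons_cons, List.all_cons]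
          simp [hfb]
      · simp only [hfb, if_false]
        rcases Nat.lt_or_ge bs.length (f :: fs).length with hlt | hge
        · -- front as long as back: greedy fails; alignment's head pair f < b fails
          have h0 : (b :: bs).length - (f :: fs).length = 0 := by
            simp only [List.length_cons] at hlen hlt ⊢; omega
          rw [canArrange_false_of_lt bs (f :: fs) hlt]
          simp only [aligned, h0, List.drop_zero, List.zip_cons_cons, List.all_cons]
          simp [hfb]
        · -- back strictly longer: dropping b changes neither side
          have hdrop : (b :: bs).length - (f :: fs).length = (bs.length - (f :: fs).length) + 1 := by
            simp only [List.length_cons] at hge ⊢; omega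
          rw [ih (f :: fs) hf hb' hge]
          simp only [aligned, hdrop, List.drop_succ_cons]

-- ===== VERDICT (by name: the statement is the Claim_ definition above) =====
theorem canTakePhoto_spec : Claim_equal_canTakePhoto := by
  intro heights1 heights2 _
  unfold Spec_canTakePhoto canTakePhoto canTakePhoto_alt
  set sa := PySem.List.sorted heights1 (fun x => x) false with hsa
  set sb := PySem.List.sorted heights2 (fun x => x) false with hsb
  have ha : sa.Pairwise (· ≤ ·) := PySem.List.sorted_pairwise heights1 (fun x => x)
  have hbp : sb.Pairwise (· ≤ ·) := PySem.List.sorted_pairwise heights2 (fun x => x)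
  rcases Nat.lt_trichotomy sa.length sb.length with h | h | h
  · simp only [h, if_true]
    exact canArrange_eq_aligned sb sa ha hbp (Nat.le_of_lt h)
  · simp only [Nat.lt_irrefl, h, if_false]
    rw [canArrange_eq_aligned sb sa ha hbp (Nat.le_of_eq h),
        canArrange_eq_aligned sa sb hbp ha (Nat.le_of_eq h.symm)]
  · have h1 : ¬ sa.length < sb.length := Nat.lt_asymm h
    simp only [h1, h, if_true, if_false]
    exact canArrange_eq_aligned sa sb hbp ha (Nat.le_of_lt h)
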